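-- pv_equiv track=rewrite | github.com/rkomahub/toric_code | plots/plot_10_braiding_e_m_anyons.py | find_odd_overlap_plaquette
-- ===== SOURCE A (Python) =====
-- def overlap_sites(a, b):
--     return sorted(set(a).intersection(set(b)))
--
-- def find_odd_overlap_plaquette(zgroup_sites, x_string):
--     # Prefer overlap=1 (simplest braiding witness)
--     for idx, plaq in enumerate(zgroup_sites):
--         if len(overlap_sites(plaq, x_string)) == 1:
--             return idx
--     # Fallback: any odd overlap
--     for idx, plaq in enumerate(zgroup_sites):
--         if len(overlap_sites(plaq, x_string)) % 2 == 1 and len(overlap_sites(plaq, x_string)) > 0: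
--             return idx
--     return None
-- ===== SOURCE B (Python) =====
-- def find_odd_overlap_plaquette(zgroup_sites, x_string):
--     xs = set(x_string)
--     fallback = None
--     for idx, plaq in enumerate(zgroup_sites):
--         n = len(set(plaq) & xs)
--         if n == 1:
--             return idx
--         if n % 2 == 1 and fallback is None:
--             fallback = idx
--     return fallback
-- ===== Notes on version B (the rewrite author's own statement) =====
-- stated objective: simpler
-- what changed: Replaces A's two full passes (each re-sorting the set intersection, up to three times per plaquette) with a single pass that computes the distinct overlap size once per plaquette, returns immediately on overlap 1, and remembers the first odd overlap as a fallback.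
import Mathlib
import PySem

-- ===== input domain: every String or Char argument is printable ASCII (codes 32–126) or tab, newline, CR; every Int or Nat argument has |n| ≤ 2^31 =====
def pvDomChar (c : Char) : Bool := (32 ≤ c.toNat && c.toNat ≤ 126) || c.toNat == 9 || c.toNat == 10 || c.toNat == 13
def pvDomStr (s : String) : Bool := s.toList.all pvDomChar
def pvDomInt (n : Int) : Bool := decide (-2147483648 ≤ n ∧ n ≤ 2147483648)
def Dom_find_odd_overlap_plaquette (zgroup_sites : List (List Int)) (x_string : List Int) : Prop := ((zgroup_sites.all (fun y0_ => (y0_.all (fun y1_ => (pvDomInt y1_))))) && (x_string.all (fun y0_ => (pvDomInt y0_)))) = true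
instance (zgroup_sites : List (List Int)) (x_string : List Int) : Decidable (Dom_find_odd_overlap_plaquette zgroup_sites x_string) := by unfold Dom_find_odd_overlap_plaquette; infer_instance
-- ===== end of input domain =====

-- B replaces A's two full passes (each recomputing a sorted set-intersection) with one
-- pass that computes the distinct overlap size once per plaquette, returning on overlap 1
-- and remembering the first odd overlap as a fallback: simpler and less redundant work.


-- ===== PORT A =====
-- overlap_sites(a, b) = sorted(set(a).intersection(set(b)))
def overlap_sites (a b : List Int) : List Int :=
  PySem.List.sorted (PySem.Set.inter (PySem.Set.ofList a) (PySem.Set.ofList b)) (fun x => x) false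

-- first for-loop of A: first idx with overlap length exactly 1
def pass1 (sites : List (List Int)) (x_string : List Int) (idx : Int) : Option Int :=
  match sites with
  | [] => none
  | plaq :: rest =>
    if (overlap_sites plaq x_string).length = 1 then some idx
    else pass1 rest x_string (idx + 1)

-- second for-loop of A: first idx with odd, positive overlap length
def pass2 (sites : List (List Int)) (x_string : List Int) (idx : Int) : Option Int :=
  match sites with
  | [] => none
  | plaq :: rest =>
    if (overlap_sites plaq x_string).length % 2 = 1 ∧ (overlap_sites plaq x_string).length > 0
    then some idx
    else pass2 rest x_string (idx + 1)

def find_odd_overlap_plaquette (zgroup_sites : List (List Int)) (x_string : List Int) : Option Int :=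
  match pass1 zgroup_sites x_string 0 with
  | some i => some i
  | none => pass2 zgroup_sites x_string 0

-- ===== PORT B =====
-- single pass with a fallback accumulator (Source B's loop)
def altLoop (sites : List (List Int)) (xs : List Int) (idx : Int) (fallback : Option Int) : Option Int :=
  match sites with
  | [] => fallback
  | plaq :: rest =>
    let n := (PySem.Set.inter (PySem.Set.ofList plaq) xs).length
    if n = 1 then some idx
    else altLoop rest xs (idx + 1)
      (if n % 2 = 1 ∧ fallback = none then some idx else fallback)

def find_odd_overlap_plaquette_alt (zgroup_sites : List (List Int)) (x_string : List Int) : Option Int :=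
  altLoop zgroup_sites (PySem.Set.ofList x_string) 0 none

-- ===== PRECONDITION & SPEC =====
def Spec_find_odd_overlap_plaquette (zgroup_sites : List (List Int)) (x_string : List Int) (out : Option Int) : Prop := out = find_odd_overlap_plaquette_alt zgroup_sites x_string
instance (zgroup_sites : List (List Int)) (x_string : List Int) (out : Option Int) : Decidable (Spec_find_odd_overlap_plaquette zgroup_sites x_string out) := by unfold Spec_find_odd_overlap_plaquette; infer_instance

-- ===== CLAIM (what is proved, stated in full; the proofs are below) =====
def Claim_equal_find_odd_overlap_plaquette : Prop := ∀ (zgroup_sites : List (List Int)) (x_string : List Int), Dom_find_odd_overlap_plaquette zgroup_sites x_string → Spec_find_odd_overlap_plaquette zgroup_sites x_string (find_odd_overlap_plaquette zgroup_sites x_string)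

-- ===== LEMMAS AND PROOFS =====

-- A's overlap length = B's overlap count (sorting does not change the length)
theorem overlap_len (a b : List Int) :
    (overlap_sites a b).length = (PySem.Set.inter (PySem.Set.ofList a) (PySem.Set.ofList b)).length := by
  simp [overlap_sites, PySem.List.length_sorted]

-- loop invariant: B's single pass equals pass1, then the fallback, then pass2
theorem altLoop_eq (sites : List (List Int)) (xs : List Int) (idx : Int) (fallback : Option Int) :
    altLoop sites (PySem.Set.ofList xs) idx fallback =
      match pass1 sites xs idx with
      | some i => some i
      | none =>
        match fallback with
        | some f => some f
        | none => pass2 sites xs idx := by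
  induction sites generalizing idx fallback with
  | nil => cases fallback <;> simp [altLoop, pass1, pass2]
  | cons plaq rest ih =>
    have hlen := overlap_len plaq xs
    by_cases h1 : (PySem.Set.inter (PySem.Set.ofList plaq) (PySem.Set.ofList xs)).length = 1
    · simp [altLoop, pass1, h1, hlen]
    · cases fallback with
      | some f =>
        have : ¬ ((PySem.Set.inter (PySem.Set.ofList plaq) (PySem.Set.ofList xs)).length % 2 = 1
            ∧ (some f : Option Int) = none) := by simp
        simp only [altLoop, pass1, hlen, h1, if_neg, this, if_false]
        rw [ih]
      | none =>
        by_cases hodd : (PySem.Set.inter (PySem.Set.ofList plaq) (PySem.Set.ofList xs)).length % 2 = 1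
        · have hpos : (PySem.Set.inter (PySem.Set.ofList plaq) (PySem.Set.ofList xs)).length > 0 := by
            omega
          simp only [altLoop, pass1, pass2, hlen, h1, if_neg, hodd, hpos, and_true,
            if_true, not_false_eq_true]
          rw [ih]
        · simp only [altLoop, pass1, pass2, hlen, h1, hodd, false_and, if_neg, not_false_eq_true]
          rw [ih]

-- ===== VERDICT (by name: the statement is the Claim_ definition above) =====
theorem find_odd_overlap_plaquette_spec : Claim_equal_find_odd_overlap_plaquette := by
  intro zgs xs _
  unfold Spec_find_odd_overlap_plaquette find_odd_overlap_plaquette find_odd_overlap_plaquette_alt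
  rw [altLoop_eq]
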